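-- pv_equiv track=rewrite | github.com/sophiaas/rlbase | rlbase/discrete_efficient_coding/visualization.py | unconcat_returns
-- ===== SOURCE A (Python) =====
-- def unconcat_returns(returns, r):
--     returns_by_epoch = []
--     prev_end = 0
--     for i,row in enumerate(r):
--         length = len(row)
--         returns_by_epoch.append(list(returns[prev_end: prev_end+length]))
--         prev_end += length
--     return returns_by_epoch
-- ===== SOURCE B (Python) =====
-- def unconcat_returns(returns, r):
--     # Consume the flat list through one shared iterator: each row pulls
--     # exactly len(row) items from it via zip (zip stops when row is
--     # exhausted, leaving the iterator positioned for the next row).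
--     # No indices, offsets or slices of `returns` are ever formed.
--     it = iter(returns)
--     return [[x for _, x in zip(row, it)] for row in r]
-- ===== Notes on version B (the rewrite author's own statement) =====
-- stated objective: alternative
-- what changed: B consumes the flat list through a single shared lazy iterator, each row pulling exactly len(row) items via zip, instead of A's index arithmetic with a running offset and list slicing.
import Mathlib
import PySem

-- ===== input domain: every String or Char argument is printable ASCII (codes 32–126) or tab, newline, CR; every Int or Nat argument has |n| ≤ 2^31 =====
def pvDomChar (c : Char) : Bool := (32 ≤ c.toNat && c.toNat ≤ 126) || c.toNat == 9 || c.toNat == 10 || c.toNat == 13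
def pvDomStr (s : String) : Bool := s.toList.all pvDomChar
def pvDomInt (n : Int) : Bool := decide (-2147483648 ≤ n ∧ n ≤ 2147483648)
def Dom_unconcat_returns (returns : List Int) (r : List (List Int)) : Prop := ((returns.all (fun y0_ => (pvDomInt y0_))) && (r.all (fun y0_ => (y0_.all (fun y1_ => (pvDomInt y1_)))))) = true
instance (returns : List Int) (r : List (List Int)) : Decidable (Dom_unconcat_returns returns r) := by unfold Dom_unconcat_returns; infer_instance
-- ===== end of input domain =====

-- B consumes the flat list through one shared iterator (take/drop per row) instead of
-- A's running-offset index slicing (objective: alternative decomposition).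

-- ===== PORT A =====
-- loop threading (returns_by_epoch, prev_end) through r, slicing returns[prev_end:prev_end+len]
def unconcat_returns (returns : List Int) (r : List (List Int)) : List (List Int) :=
  (r.foldl
    (fun (st : List (List Int) × Int) row =>
      (st.1 ++ [PySem.List.slice returns (some st.2) (some (st.2 + (row.length : Int)))],
       st.2 + (row.length : Int)))
    ([], 0)).1

-- ===== PORT B =====
-- iterator state = the not-yet-consumed suffix; zip(row, it) pulls min(len row, remaining)
-- items, i.e. rest.take row.length, and leaves the iterator at rest.drop row.length
def unconcatIter (rest : List Int) (r : List (List Int)) : List (List Int) :=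
  match r with
  | [] => []
  | row :: rs => rest.take row.length :: unconcatIter (rest.drop row.length) rs

def unconcat_returns_alt (returns : List Int) (r : List (List Int)) : List (List Int) :=
  unconcatIter returns r

-- ===== PRECONDITION & SPEC =====
def Spec_unconcat_returns (returns : List Int) (r : List (List Int)) (out : List (List Int)) : Prop := out = unconcat_returns_alt returns r
instance (returns : List Int) (r : List (List Int)) (out : List (List Int)) : Decidable (Spec_unconcat_returns returns r out) := by unfold Spec_unconcat_returns; infer_instance

-- ===== CLAIM (what is proved, stated in full; the proofs are below) =====
def Claim_equal_unconcat_returns : Prop := ∀ (returns : List Int) (r : List (List Int)), Dom_unconcat_returns returns r → Spec_unconcat_returns returns r (unconcat_returns returns r)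

-- ===== LEMMAS AND PROOFS =====

-- A's chunk sequence starting at offset s, written as a recursion
def pvChunks (returns : List Int) (r : List (List Int)) (s : Int) : List (List Int) :=
  match r with
  | [] => []
  | row :: rs =>
      PySem.List.slice returns (some s) (some (s + (row.length : Int)))
        :: pvChunks returns rs (s + (row.length : Int))

theorem unconcat_foldl_eq (returns : List Int) (r : List (List Int))
    (acc : List (List Int)) (s : Int) :
    (r.foldl
      (fun (st : List (List Int) × Int) row =>
        (st.1 ++ [PySem.List.slice returns (some st.2) (some (st.2 + (row.length : Int)))],
         st.2 + (row.length : Int)))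
      (acc, s)).1 = acc ++ pvChunks returns r s := by
  induction r generalizing acc s with
  | nil => simp [pvChunks]
  | cons row rs ih =>
      simp only [List.foldl_cons, pvChunks, ih, List.append_assoc, List.singleton_append]

theorem chunks_eq_iter (returns : List Int) (r : List (List Int)) (j : Nat) :
    pvChunks returns r (j : Int) = unconcatIter (returns.drop j) r := by
  induction r generalizing j with
  | nil => rfl
  | cons row rs ih =>
      have hcast : ((j : Int) + (row.length : Int)) = ((j + row.length : Nat) : Int) := by
        push_cast; ring
      simp only [pvChunks, unconcatIter, hcast, ih, PySem.List.slice_natCast,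
        Nat.add_sub_cancel_left, List.drop_drop]

-- ===== VERDICT (by name: the statement is the Claim_ definition above) =====
theorem unconcat_returns_spec : Claim_equal_unconcat_returns := by
  intro returns r _
  show _ = _
  have h0 := chunks_eq_iter returns r 0
  simp only [Int.natCast_zero, List.drop_zero] at h0
  simp only [unconcat_returns, unconcat_returns_alt, unconcat_foldl_eq, List.nil_append, h0]
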